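-- pv_equiv track=rewrite | github.com/iiMaXii/advent_of_code_2023 | day_13/main.py | find_reflects_horizontal_smudge
-- ===== SOURCE A (Python) =====
-- Grid = list[str]
--
-- def find_reflects_horizontal_smudge(grid: Grid) -> int:
--     for y in range(1, len(grid)):
--         smuges_required = 0
--         for top, down in zip(reversed(grid[:y]), grid[y:]):
--             smuges_required += sum(t != d for t, d in zip(top, down))
--
--         if smuges_required == 1:
--             return y
--
--     return 0
-- ===== SOURCE B (Python) =====
-- def find_reflects_horizontal_smudge(grid):
--     n = len(grid)
--     # Stage 1: materialize the full pairwise row-distance table.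
--     dist = [[sum(a != b for a, b in zip(grid[i], grid[j])) for j in range(n)]
--             for i in range(n)]
--     # Stage 2: for each candidate line, sum precomputed distances over mirrored pairs.
--     for y in range(1, n):
--         total = 0
--         i, j = y - 1, y
--         while i >= 0 and j < n:
--             total += dist[i][j]
--             i -= 1
--             j += 1
--         if total == 1:
--             return y
--     return 0
-- ===== Notes on version B (the rewrite author's own statement) =====
-- stated objective: alternative
-- what changed: B first materializes the full pairwise row-distance table in a separate pass, then the candidate loop only sums precomputed table entries over mirrored index pairs, instead of A's per-candidate rescanning of the rows via slice/reverse/zip; it trades A's early exit (B always builds the whole table) for the staged table-then-lookup structure.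
import Mathlib
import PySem

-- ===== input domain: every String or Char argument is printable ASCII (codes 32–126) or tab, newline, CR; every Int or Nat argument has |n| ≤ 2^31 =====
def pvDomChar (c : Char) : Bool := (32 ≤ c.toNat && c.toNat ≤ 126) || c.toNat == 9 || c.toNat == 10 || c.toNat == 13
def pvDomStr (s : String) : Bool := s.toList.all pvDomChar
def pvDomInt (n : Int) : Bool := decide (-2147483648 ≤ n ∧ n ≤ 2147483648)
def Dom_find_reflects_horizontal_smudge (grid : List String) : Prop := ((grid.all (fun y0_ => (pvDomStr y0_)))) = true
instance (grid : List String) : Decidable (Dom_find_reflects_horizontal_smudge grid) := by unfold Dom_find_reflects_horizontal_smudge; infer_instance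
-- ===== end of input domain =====

-- B restructures the search into two stages: a pass that materializes the full pairwise
-- row-distance table, then a candidate loop that only sums precomputed table entries over
-- mirrored index pairs, instead of A's per-candidate rescanning of the rows (alternative
-- decomposition; same return value, proved below).

-- ===== PORT A =====
-- for y in range(1, len(grid)): sum mismatches over zip(reversed(grid[:y]), grid[y:]); return y if == 1
def pvLoopA (grid : List String) : List Int → Int
  | [] => 0
  | y :: ys =>
    let sm : Int := ((PySem.List.slice grid none (some y)).reverse.zip
        (PySem.List.slice grid (some y) none)).foldl
      (fun acc td => acc + (td.1.toList.zip td.2.toList).foldl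
        (fun s cc => s + (if cc.1 ≠ cc.2 then 1 else 0)) 0) 0
    if sm = 1 then y else pvLoopA grid ys

def find_reflects_horizontal_smudge (grid : List String) : Int :=
  pvLoopA grid (PySem.List.pyRange 1 (grid.length : Int) 1)

-- ===== PORT B =====
-- dist = [[sum(a != b for a, b in zip(grid[i], grid[j])) for j in range(n)] for i in range(n)]
-- (grid[i]/grid[j] are indexed with 0 ≤ i, j < n; pyGetD with a dummy default is exact there)
def pvTable (grid : List String) : List (List Int) :=
  (PySem.List.pyRange 0 (grid.length : Int) 1).map (fun i =>
    (PySem.List.pyRange 0 (grid.length : Int) 1).map (fun j =>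
      ((PySem.List.pyGetD grid i "").toList.zip (PySem.List.pyGetD grid j "").toList).foldl
        (fun s cc => s + (if cc.1 ≠ cc.2 then 1 else 0)) 0))

-- while i >= 0 and j < n: total += dist[i][j]; i -= 1; j += 1
def pvSumB (n : Int) (dist : List (List Int)) (i j total : Int) : Int :=
  if _h : 0 ≤ i ∧ j < n then
    pvSumB n dist (i - 1) (j + 1)
      (total + PySem.List.pyGetD (PySem.List.pyGetD dist i []) j 0)
  else total
termination_by (n - j).toNat
decreasing_by omega

-- for y in range(1, n): total = (while loop); return y if total == 1
def pvLoopB (n : Int) (dist : List (List Int)) (y : Int) : Int :=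
  if _h : y < n then
    (if pvSumB n dist (y - 1) y 0 = 1 then y else pvLoopB n dist (y + 1))
  else 0
termination_by (n - y).toNat
decreasing_by omega

def find_reflects_horizontal_smudge_alt (grid : List String) : Int :=
  pvLoopB (grid.length : Int) (pvTable grid) 1

-- ===== PRECONDITION & SPEC =====
def Spec_find_reflects_horizontal_smudge (grid : List String) (out : Int) : Prop := out = find_reflects_horizontal_smudge_alt grid
instance (grid : List String) (out : Int) : Decidable (Spec_find_reflects_horizontal_smudge grid out) := by unfold Spec_find_reflects_horizontal_smudge; infer_instance

-- ===== CLAIM (what is proved, stated in full; the proofs are below) =====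
def Claim_equal_find_reflects_horizontal_smudge : Prop := ∀ (grid : List String), Dom_find_reflects_horizontal_smudge grid → Spec_find_reflects_horizontal_smudge grid (find_reflects_horizontal_smudge grid)

-- ===== LEMMAS AND PROOFS =====

-- number of mismatching character pairs, as both inner sums compute it
def pvDL (cs : List (Char × Char)) : Int :=
  (cs.map (fun cc => if cc.1 ≠ cc.2 then (1 : Int) else 0)).sum

-- the exact mirrored-pair mismatch total along the diagonal starting at (i, j)
def pvT (grid : List String) (i j : Int) : Int :=
  if _h : 0 ≤ i ∧ j < (grid.length : Int) then
    pvDL ((PySem.List.pyGetD grid i "").toList.zip (PySem.List.pyGetD grid j "").toList)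
      + pvT grid (i - 1) (j + 1)
  else 0
termination_by ((grid.length : Int) - j).toNat
decreasing_by omega

-- table entries are the row distances
lemma pvTable_get (grid : List String) (i j : Int)
    (hi0 : 0 ≤ i) (hin : i < (grid.length : Int))
    (hj0 : 0 ≤ j) (hjn : j < (grid.length : Int)) :
    PySem.List.pyGetD (PySem.List.pyGetD (pvTable grid) i []) j 0
      = pvDL ((PySem.List.pyGetD grid i "").toList.zip (PySem.List.pyGetD grid j "").toList) := by
  unfold pvTable
  rw [PySem.List.pyGetD_map_pyRange_of_nonneg _ _ i _ hi0 hin,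
    PySem.List.pyGetD_map_pyRange_of_nonneg _ _ j _ hj0 hjn]
  rw [PySem.List.foldl_add (g := fun cc : Char × Char => if cc.1 ≠ cc.2 then (1 : Int) else 0)]
  simp [pvDL]

-- the while-accumulation over the table equals total + the diagonal sum
lemma pvSumB_eq (grid : List String) (i j total : Int)
    (hin : i < (grid.length : Int)) (hj0 : 0 ≤ j) :
    pvSumB (grid.length : Int) (pvTable grid) i j total = total + pvT grid i j := by
  fun_induction pvSumB (grid.length : Int) (pvTable grid) i j total with
  | case1 i j total h ih =>
    have hT : pvT grid i j
        = pvDL ((PySem.List.pyGetD grid i "").toList.zip (PySem.List.pyGetD grid j "").toList)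
          + pvT grid (i - 1) (j + 1) := by
      rw [pvT, dif_pos ⟨h.1, h.2⟩]
    rw [ih (by omega) (by omega), pvTable_get grid i j h.1 hin hj0 h.2, hT]
    ring
  | case2 i j total h =>
    rw [pvT, dif_neg (by rintro ⟨h1, h2⟩; exact h ⟨h1, h2⟩)]
    ring

-- A's inner mirrored-pair sum, generalized over a drop offset, equals pvT on the diagonal
lemma pvZipSum (grid : List String) (y : Nat) (hy : y ≤ grid.length) :
    ∀ (d k : Nat), d = y - k →
      ((((grid.take y).reverse.drop k).zip ((grid.drop y).drop k)).map
          (fun td : String × String => pvDL (td.1.toList.zip td.2.toList))).sum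
        = pvT grid ((y : Int) - 1 - (k : Int)) ((y : Int) + (k : Int)) := by
  intro d
  induction d with
  | zero =>
    intro k hk
    have hky : y ≤ k := by omega
    have h1 : ((grid.take y).reverse.drop k) = [] := by
      apply List.drop_eq_nil_of_le
      simp [List.length_take, Nat.min_eq_left hy]; omega
    rw [h1, List.zip_nil_left, List.map_nil, List.sum_nil, pvT,
      dif_neg (by rintro ⟨hi, -⟩; omega)]
  | succ d ih =>
    intro k hk
    have hky : k < y := by omega
    by_cases hn : y + k < grid.length
    · have hl1 : k < ((grid.take y).reverse).length := by
        simp [List.length_take, Nat.min_eq_left hy]; omega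
      have hl2 : k < (grid.drop y).length := by
        simp [List.length_drop]; omega
      rw [List.drop_eq_getElem_cons hl1, List.drop_eq_getElem_cons hl2,
        List.zip_cons_cons, List.map_cons, List.sum_cons]
      have hg1 : ((grid.take y).reverse)[k] = grid[y - 1 - k]'(by omega) := by
        rw [List.getElem_reverse, List.getElem_take]
        congr 1
        simp only [List.length_take]
        omega
      have hg2 : (grid.drop y)[k] = grid[y + k]'(by omega) := by
        rw [List.getElem_drop]
      rw [pvT, dif_pos (by constructor <;> omega)]
      have hp1 : PySem.List.pyGetD grid ((y : Int) - 1 - (k : Int)) "" = grid[y - 1 - k]'(by omega) := by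
        rw [PySem.List.pyGetD_eq_getElem grid "" (by omega) (by omega)]
        congr 1
        omega
      have hp2 : PySem.List.pyGetD grid ((y : Int) + (k : Int)) "" = grid[y + k]'(by omega) := by
        rw [PySem.List.pyGetD_eq_getElem grid "" (by omega) (by omega)]
        congr 1
      rw [hg1, hg2, hp1, hp2]
      have := ih (k + 1) (by omega)
      rw [show ((y : Int) - 1 - (k : Int)) - 1 = (y : Int) - 1 - ((k + 1 : Nat) : Int) by push_cast; ring,
        show ((y : Int) + (k : Int)) + 1 = (y : Int) + ((k + 1 : Nat) : Int) by push_cast; ring,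
        ← this]
    · have h2 : ((grid.drop y).drop k) = [] := by
        apply List.drop_eq_nil_of_le
        simp [List.length_drop]; omega
      rw [h2, List.zip_nil_right, List.map_nil, List.sum_nil, pvT,
        dif_neg (by rintro ⟨-, hj⟩; omega)]

-- A's inner foldl for candidate y equals pvT (y-1) y
lemma pvInnerA (grid : List String) (y : Int) (h1 : 1 ≤ y) (h2 : y ≤ (grid.length : Int)) :
    ((PySem.List.slice grid none (some y)).reverse.zip
        (PySem.List.slice grid (some y) none)).foldl
      (fun acc td => acc + (td.1.toList.zip td.2.toList).foldl
        (fun s cc => s + (if cc.1 ≠ cc.2 then 1 else 0)) 0) 0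
      = pvT grid (y - 1) y := by
  rw [PySem.List.slice_to grid (by omega), PySem.List.slice_from grid (by omega)]
  have hfold : ∀ td : String × String,
      (td.1.toList.zip td.2.toList).foldl
        (fun s cc => s + (if cc.1 ≠ cc.2 then 1 else 0)) 0
        = pvDL (td.1.toList.zip td.2.toList) := by
    intro td
    rw [PySem.List.foldl_add (g := fun cc : Char × Char => if cc.1 ≠ cc.2 then (1 : Int) else 0)]
    simp [pvDL]
  rw [PySem.List.foldl_congr_mem'
    ((grid.take y.toNat).reverse.zip (grid.drop y.toNat))
    (fun acc td => acc + (td.1.toList.zip td.2.toList).foldl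
      (fun s cc => s + (if cc.1 ≠ cc.2 then 1 else 0)) 0)
    (fun acc td => acc + pvDL (td.1.toList.zip td.2.toList))
    0
    (fun x _ acc => by simp only [hfold])]
  rw [PySem.List.foldl_add (g := fun td : String × String => pvDL (td.1.toList.zip td.2.toList))]
  rw [zero_add]
  have := pvZipSum grid y.toNat (by omega) (y.toNat - 0) 0 rfl
  simp only [List.drop_zero] at this
  have hy : ((y.toNat : Int)) = y := by omega
  rw [hy] at this
  simpa using this

lemma pvLoops_eq (grid : List String) :
    ∀ (d : Nat) (y : Int), 1 ≤ y → d = ((grid.length : Int) - y).toNat →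
      pvLoopA grid (PySem.List.pyRange y (grid.length : Int) 1)
        = pvLoopB (grid.length : Int) (pvTable grid) y := by
  intro d
  induction d with
  | zero =>
    intro y h1 hd
    rw [PySem.List.pyRange_one_eq_nil (by omega : (grid.length : Int) ≤ y), pvLoopA, pvLoopB,
      dif_neg (by omega)]
  | succ d ih =>
    intro y h1 hd
    have hlt : y < (grid.length : Int) := by omega
    rw [PySem.List.pyRange_one_cons hlt, pvLoopA, pvLoopB, dif_pos hlt]
    have hsm := pvInnerA grid y h1 (by omega)
    have hB := pvSumB_eq grid (y - 1) y 0 (by omega) (by omega)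
    rw [hB, zero_add]
    split_ifs with hc1 hc2 hc2
    · rfl
    · rw [hsm] at hc1; omega
    · rw [hsm] at hc1; omega
    · exact ih (y + 1) (by omega) (by omega)

-- ===== VERDICT (by name: the statement is the Claim_ definition above) =====
theorem find_reflects_horizontal_smudge_spec : Claim_equal_find_reflects_horizontal_smudge := by
  intro grid _
  unfold Spec_find_reflects_horizontal_smudge find_reflects_horizontal_smudge
    find_reflects_horizontal_smudge_alt
  exact pvLoops_eq grid (((grid.length : Int) - 1).toNat) 1 (by omega) rfl
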